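-- pv_equiv track=rewrite | github.com/arshiyamohammed15/cicdpipeline | validator/rules/comments.py | _count_complex_words
-- ===== SOURCE A (Python) =====
-- def _count_complex_words(text: str) -> int:
--     """Count complex words in text (simplified)."""
--     # Simple heuristic: words with more than 3 syllables or technical terms
--     complex_words = [
--         'implementation', 'configuration', 'initialization', 'authentication',
--         'authorization', 'encryption', 'decryption', 'optimization',
--         'initialization', 'configuration', 'authentication', 'authorization'
--     ]
--
--     words = text.lower().split()
--     complex_count = sum(1 for word in words if word in complex_words)
--
--     # Also count words with more than 3 syllables (simplified)
--     for word in words: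
--         if len(word) > 8 and word not in complex_words:
--             complex_count += 1
--
--     return complex_count
-- ===== SOURCE B (Python) =====
-- def _count_complex_words(text: str) -> int:
--     """Count complex words in text (simplified)."""
--     # Every hard-coded "technical term" in A is itself longer than 8 characters,
--     # so the two passes collapse to a single length test.
--     return sum(1 for word in text.lower().split() if len(word) > 8)
-- ===== Notes on version B (the rewrite author's own statement) =====
-- stated objective: simpler
-- what changed: Drops the hard-coded complex_words list and both passes: since every listed term is longer than 8 characters, the result equals a single-pass count of words of length > 8.
import Mathlib
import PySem

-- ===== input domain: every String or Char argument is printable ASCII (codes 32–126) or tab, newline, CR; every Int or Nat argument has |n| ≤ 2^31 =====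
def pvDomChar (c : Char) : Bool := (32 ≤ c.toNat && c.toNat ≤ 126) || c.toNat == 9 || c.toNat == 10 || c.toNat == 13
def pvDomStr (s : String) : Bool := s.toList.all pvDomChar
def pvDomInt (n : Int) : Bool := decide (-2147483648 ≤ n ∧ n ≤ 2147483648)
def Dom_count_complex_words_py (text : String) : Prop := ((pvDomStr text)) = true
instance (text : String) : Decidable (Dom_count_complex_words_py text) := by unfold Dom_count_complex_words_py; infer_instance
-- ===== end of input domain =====

-- B drops A's hard-coded complex_words list and its two passes: every listed term is longer
-- than 8 characters, so the result is a single-pass count of words of length > 8 (simpler).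

-- ===== PORT A =====
def pvComplexWords : List String :=
  ["implementation", "configuration", "initialization", "authentication",
   "authorization", "encryption", "decryption", "optimization",
   "initialization", "configuration", "authentication", "authorization"]

def count_complex_words_py (text : String) : Int :=
  let words := PySem.Str.split₀ (PySem.Str.lower text)
  let complexCount : Int := (words.map (fun word => if word ∈ pvComplexWords then (1 : Int) else 0)).sum
  words.foldl (fun acc word =>
    if 8 < PySem.Str.len word ∧ word ∉ pvComplexWords then acc + 1 else acc) complexCount

-- ===== PORT B =====
def count_complex_words_py_alt (text : String) : Int :=
  ((PySem.Str.split₀ (PySem.Str.lower text)).countP (fun word => decide (8 < PySem.Str.len word)) : Nat)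

-- ===== PRECONDITION & SPEC =====
def Spec_count_complex_words_py (text : String) (out : Int) : Prop := out = count_complex_words_py_alt text
instance (text : String) (out : Int) : Decidable (Spec_count_complex_words_py text out) := by unfold Spec_count_complex_words_py; infer_instance

-- ===== CLAIM (what is proved, stated in full; the proofs are below) =====
def Claim_equal_count_complex_words_py : Prop := ∀ (text : String), Dom_count_complex_words_py text → Spec_count_complex_words_py text (count_complex_words_py text)

-- ===== LEMMAS AND PROOFS =====

-- every hard-coded term is longer than 8 characters
lemma pvComplexWords_long : ∀ w ∈ pvComplexWords, 8 < PySem.Str.len w := by decide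

-- the foldl with its seeded accumulator counts exactly the words of length > 8
lemma pv_fold_count (ws : List String) (a : Int) :
    ws.foldl (fun acc word =>
      if 8 < PySem.Str.len word ∧ word ∉ pvComplexWords then acc + 1 else acc)
      (a + (ws.map (fun word => if word ∈ pvComplexWords then (1 : Int) else 0)).sum)
    = a + (ws.countP (fun word => decide (8 < PySem.Str.len word)) : Nat) := by
  induction ws generalizing a with
  | nil => simp
  | cons w ws ih =>
    simp only [List.map_cons, List.sum_cons, List.foldl_cons, List.countP_cons]
    by_cases hmem : w ∈ pvComplexWords
    · have hlen := pvComplexWords_long w hmem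
      rw [if_pos hmem, if_neg (by simp [hmem])]
      have := ih (a + 1)
      rw [show a + (1 + (ws.map fun word => if word ∈ pvComplexWords then (1:Int) else 0).sum)
            = a + 1 + (ws.map fun word => if word ∈ pvComplexWords then (1:Int) else 0).sum by ring,
          this]
      have hl : 8 < w.length := by simpa [PySem.Str.len_eq] using hlen
      simp [hl]
      ring
    · rw [if_neg hmem]
      by_cases hlen : 8 < PySem.Str.len w
      · rw [if_pos ⟨hlen, hmem⟩]
        have := ih (a + 1)
        rw [show a + (0 + (ws.map fun word => if word ∈ pvComplexWords then (1:Int) else 0).sum) + 1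
              = a + 1 + (ws.map fun word => if word ∈ pvComplexWords then (1:Int) else 0).sum by ring,
            this]
        have hl : 8 < w.length := by simpa [PySem.Str.len_eq] using hlen
        simp [hl]
        ring
      · have hl : ¬ 8 < w.length := by simpa [PySem.Str.len_eq] using hlen
        rw [if_neg (by simp [hl])]
        have := ih a
        rw [show a + (0 + (ws.map fun word => if word ∈ pvComplexWords then (1:Int) else 0).sum)
              = a + (ws.map fun word => if word ∈ pvComplexWords then (1:Int) else 0).sum by ring,
            this]
        simp [hl]

-- ===== VERDICT (by name: the statement is the Claim_ definition above) =====
theorem count_complex_words_py_spec : Claim_equal_count_complex_words_py := by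
  intro text _
  unfold Spec_count_complex_words_py count_complex_words_py count_complex_words_py_alt
  have := pv_fold_count (PySem.Str.split₀ (PySem.Str.lower text)) 0
  simpa using this
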